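-- pv_equiv track=rewrite | github.com/jayantsolanki/Care-Taker-Robot | motion.py | getcoor
-- ===== SOURCE A (Python) =====
-- grid_line_x = 13 #number of horizontal lines
--
-- grid_line_y = 13 #number of vertical lines
--
-- def getcoor(pixel_x,pixel_y,height,width):
--         '''
--         cx=x/n#(int)(round(x/m))
--         cy=y/n#(int)(round(y/n))
--         return cx,cy
--         '''
--         #img=cv2.imread(filename) ##getting input image
--         height_X=0# stores 0 for initial  pixel's x coordinate
--         width_Y=0# stores 0 for initial  pixel's y coordinate
--         for i in range(0, grid_line_x): ##drawing lines
--                 #step by step increases the pixel's x coordinates by adding width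
--                 height_X=height_X+width
--                 width_Y=0
--                 for j in range(0, grid_line_y): ##drawing lines
--                         #step by step increases the pixel's y coordinates by adding height
--                         width_Y=width_Y+height
--                         #print X,Y
--                         if pixel_x<=height_X and pixel_y<=width_Y:# if pixel_x and pixel_y lies under height_X and width_Y, then grid cell coodinates is returned
--                                 return i,j #return respective grid coordinates
--                                 break
-- ===== SOURCE B (Python) =====
-- grid_line_x = 13
--
-- grid_line_y = 13
--
-- def _first_index(p, step, n):
--     acc = 0
--     for k in range(0, n):
--         acc = acc + step
--         if p <= acc:
--             return k
--     return None
--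
-- def getcoor(pixel_x, pixel_y, height, width):
--     i = _first_index(pixel_x, width, grid_line_x)
--     j = _first_index(pixel_y, height, grid_line_y)
--     if i is None or j is None:
--         return None
--     return i, j
-- ===== Notes on version B (the rewrite author's own statement) =====
-- stated objective: simpler
-- what changed: B decouples the nested 13x13 scan into two independent accumulating searches (first i with pixel_x <= (i+1)*width, first j with pixel_y <= (j+1)*height) and combines the results, since A's inner condition on pixel_y does not depend on i.
import Mathlib
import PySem

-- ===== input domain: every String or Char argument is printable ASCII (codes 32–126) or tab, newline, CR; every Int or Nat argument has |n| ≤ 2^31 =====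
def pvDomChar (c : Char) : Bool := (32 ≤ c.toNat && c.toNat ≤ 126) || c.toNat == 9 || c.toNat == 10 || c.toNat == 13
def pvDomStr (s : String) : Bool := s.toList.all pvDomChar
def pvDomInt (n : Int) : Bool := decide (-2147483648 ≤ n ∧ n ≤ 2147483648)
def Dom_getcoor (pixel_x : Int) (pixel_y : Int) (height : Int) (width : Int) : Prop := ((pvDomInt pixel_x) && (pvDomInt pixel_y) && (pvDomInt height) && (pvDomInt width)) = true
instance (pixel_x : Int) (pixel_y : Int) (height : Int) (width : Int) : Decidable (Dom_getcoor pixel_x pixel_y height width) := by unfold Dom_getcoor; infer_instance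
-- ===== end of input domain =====

-- B replaces A's nested 13x13 scan by two independent accumulating searches (i from pixel_x/width,
-- j from pixel_y/height) combined at the end; same return value, simpler decomposition.

-- ===== PORT A =====
-- inner for-j loop of A: j counts up, width_Y accumulates height; n = remaining iterations
def getcoorInnerA (pixel_x pixel_y height height_X : Int) (i : Int) : Nat → Int → Int → Option (Int × Int)
  | 0, _, _ => none
  | n+1, j, width_Y =>
    let width_Y' := width_Y + height
    if pixel_x ≤ height_X ∧ pixel_y ≤ width_Y' then some (i, j)
    else getcoorInnerA pixel_x pixel_y height height_X i n (j+1) width_Y'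

-- outer for-i loop of A: i counts up, height_X accumulates width
def getcoorOuterA (pixel_x pixel_y height width : Int) : Nat → Int → Int → Option (Int × Int)
  | 0, _, _ => none
  | n+1, i, height_X =>
    let height_X' := height_X + width
    match getcoorInnerA pixel_x pixel_y height height_X' i 13 0 0 with
    | some r => some r
    | none => getcoorOuterA pixel_x pixel_y height width n (i+1) height_X'

def getcoor (pixel_x : Int) (pixel_y : Int) (height : Int) (width : Int) : Option (Int × Int) :=
  getcoorOuterA pixel_x pixel_y height width 13 0 0

-- ===== PORT B =====
-- _first_index of Source B: first k (of n) with p ≤ accumulated step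
def firstIndexB (p step : Int) : Nat → Int → Int → Option Int
  | 0, _, _ => none
  | n+1, k, acc =>
    let acc' := acc + step
    if p ≤ acc' then some k else firstIndexB p step n (k+1) acc'

def getcoor_alt (pixel_x : Int) (pixel_y : Int) (height : Int) (width : Int) : Option (Int × Int) :=
  match firstIndexB pixel_x width 13 0 0, firstIndexB pixel_y height 13 0 0 with
  | some i, some j => some (i, j)
  | _, _ => none

-- ===== PRECONDITION & SPEC =====
def Spec_getcoor (pixel_x : Int) (pixel_y : Int) (height : Int) (width : Int) (out : Option (Int × Int)) : Prop := out = getcoor_alt pixel_x pixel_y height width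
instance (pixel_x : Int) (pixel_y : Int) (height : Int) (width : Int) (out : Option (Int × Int)) : Decidable (Spec_getcoor pixel_x pixel_y height width out) := by unfold Spec_getcoor; infer_instance

-- ===== CLAIM (what is proved, stated in full; the proofs are below) =====
def Claim_equal_getcoor : Prop := ∀ (pixel_x : Int) (pixel_y : Int) (height : Int) (width : Int), Dom_getcoor pixel_x pixel_y height width → Spec_getcoor pixel_x pixel_y height width (getcoor pixel_x pixel_y height width)

-- ===== LEMMAS AND PROOFS =====

-- A's inner loop: the x-test is constant in j, so it is B's j-search tagged with i
theorem innerA_eq (px py h hX i : Int) (n : Nat) :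
    ∀ (j wY : Int), getcoorInnerA px py h hX i n j wY =
      if px ≤ hX then (firstIndexB py h n j wY).map (fun jj => (i, jj)) else none := by
  induction n with
  | zero => intro j wY; simp [getcoorInnerA, firstIndexB]
  | succ n ih =>
    intro j wY
    simp only [getcoorInnerA, firstIndexB, ih]
    by_cases hx : px ≤ hX <;> by_cases hy : py ≤ wY + h <;>
      simp [hx, hy, Option.map]

-- one-step unfolding lemmas (kept separate so literal-fuel applications stay folded)
theorem firstIndexB_succ (p s : Int) (n : Nat) (k acc : Int) :
    firstIndexB p s (n+1) k acc =
      if p ≤ acc + s then some k else firstIndexB p s n (k+1) (acc + s) := rfl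

theorem outerA_succ (px py h w : Int) (n : Nat) (i hX : Int) :
    getcoorOuterA px py h w (n+1) i hX =
      match getcoorInnerA px py h (hX + w) i 13 0 0 with
      | some r => some r
      | none => getcoorOuterA px py h w n (i+1) (hX + w) := rfl

-- A's outer loop equals the combination of the two independent searches
theorem outerA_eq (px py h w : Int) (n : Nat) :
    ∀ (i hX : Int), getcoorOuterA px py h w n i hX =
      match firstIndexB px w n i hX, firstIndexB py h 13 0 0 with
      | some ii, some jj => some (ii, jj)
      | _, _ => none := by
  induction n with
  | zero => intro i hX; cases firstIndexB py h 13 0 0 <;> rfl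
  | succ n ih =>
    intro i hX
    rw [outerA_succ, innerA_eq, ih]
    generalize firstIndexB py h 13 0 0 = J
    rw [firstIndexB_succ]
    by_cases hx : px ≤ hX + w
    · cases J <;> simp [hx]
    · cases J <;> simp [hx]

-- ===== VERDICT (by name: the statement is the Claim_ definition above) =====
theorem getcoor_spec : Claim_equal_getcoor := by
  intro px py h w _
  unfold Spec_getcoor getcoor getcoor_alt
  rw [outerA_eq]
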